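-- pv_equiv track=rewrite | github.com/zenithmediahq/JobSearchAgent | services/job_fetcher.py | normalize_text
-- ===== SOURCE A (Python) =====
-- import unicodedata
--
-- def normalize_text(value: str) -> str:
--     normalized = unicodedata.normalize("NFKD", value or "")
--     normalized = normalized.encode("ascii", "ignore").decode("ascii")
--     normalized = normalized.lower().strip()
--
--     for char in [",", ".", "!", "?", ":", ";", "|", "-", "(", ")", "/"]:
--         normalized = normalized.replace(char, " ")
--
--     normalized = " ".join(normalized.split())
--     return normalized
-- ===== SOURCE B (Python) =====
-- import unicodedata
--
-- _PUNCT = set(",.!?:;|-()/")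
--
-- def normalize_text(value: str) -> str:
--     folded = unicodedata.normalize("NFKD", value or "")
--     folded = folded.encode("ascii", "ignore").decode("ascii").lower()
--     out = []
--     pending = False
--     for ch in folded:
--         if ch.isspace() or ch in _PUNCT:
--             pending = True
--         else:
--             if pending and out:
--                 out.append(" ")
--             out.append(ch)
--             pending = False
--     return "".join(out)
-- ===== Notes on version B (the rewrite author's own statement) =====
-- stated objective: alternative
-- what changed: The 11 whole-string replace passes plus the final split/join are fused into a single left-to-right scan that keeps an output buffer and a pending-separator flag, emitting one space per run of whitespace/punctuation between words.
import Mathlib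
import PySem

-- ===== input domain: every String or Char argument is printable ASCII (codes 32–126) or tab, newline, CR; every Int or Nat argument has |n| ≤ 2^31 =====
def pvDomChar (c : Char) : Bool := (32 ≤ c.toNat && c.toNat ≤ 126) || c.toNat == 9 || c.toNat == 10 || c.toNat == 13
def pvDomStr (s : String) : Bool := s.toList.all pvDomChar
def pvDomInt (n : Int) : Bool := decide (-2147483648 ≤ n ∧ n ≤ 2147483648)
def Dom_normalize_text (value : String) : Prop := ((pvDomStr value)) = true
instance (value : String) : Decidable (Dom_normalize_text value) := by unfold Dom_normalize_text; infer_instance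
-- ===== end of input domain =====

-- B replaces A's 11 whole-string replace passes plus the final split/join with one left-to-right
-- scan carrying a pending-separator flag; same return value (objective: alternative).

-- the 11 punctuation characters of A's replace loop (shared literal)
def pvPuncts : List Char := [',', '.', '!', '?', ':', ';', '|', '-', '(', ')', '/']

-- ===== PORT A =====
-- NFKD normalization followed by ascii encode("ignore")/decode is the identity on the
-- printable-ASCII input domain; it is ported as the identity (exact on Dom_normalize_text).
def normalize_text (value : String) : String :=
  let normalized := PySem.Str.strip (PySem.Str.lower value)
  let normalized := pvPuncts.foldl
    (fun s c => PySem.Str.replace s (String.ofList [c]) " ") normalized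
  PySem.Str.join " " (PySem.Str.split₀ normalized)

-- ===== PORT B =====
def pvIsSepB (c : Char) : Bool := PySem.Chars.isspace c || pvPuncts.contains c

-- the scan loop of Source B: out buffer plus pending-boundary flag
def pvScan : List Char → List Char → Bool → List Char
  | [], out, _ => out
  | c :: rest, out, pending =>
    if pvIsSepB c then pvScan rest out true
    else pvScan rest (out ++ (if pending && !out.isEmpty then [' ', c] else [c])) false

def normalize_text_alt (value : String) : String :=
  String.ofList (pvScan (PySem.Chars.lower value.toList) [] false)

-- ===== PRECONDITION & SPEC =====
def Spec_normalize_text (value : String) (out : String) : Prop := out = normalize_text_alt value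
instance (value : String) (out : String) : Decidable (Spec_normalize_text value out) := by unfold Spec_normalize_text; infer_instance

-- ===== CLAIM (what is proved, stated in full; the proofs are below) =====
def Claim_equal_normalize_text : Prop := ∀ (value : String), Dom_normalize_text value → Spec_normalize_text value (normalize_text value)

-- ===== LEMMAS AND PROOFS =====

-- the character map that A's replace loop amounts to
def pvF (c : Char) : Char := if c ∈ pvPuncts then ' ' else c

-- the common normal form: one-pass word collapsing, parameterised by the separator test;
-- `started` = some character was emitted, `pending` = a separator was seen since.
def pvNrm (sep : Char → Bool) : List Char → Bool → Bool → List Char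
  | [], _, _ => []
  | c :: t, started, pending =>
    if sep c then pvNrm sep t started true
    else (if started && pending then [' ', c] else [c]) ++ pvNrm sep t true false

lemma pvScan_inv (t : List Char) : ∀ (out : List Char) (pending : Bool),
    pvScan t out pending = out ++ pvNrm pvIsSepB t (!out.isEmpty) pending := by
  induction t with
  | nil => intro out pending; simp [pvScan, pvNrm]
  | cons c rest ih =>
    intro out pending
    by_cases h : pvIsSepB c = true
    · simp [pvScan, pvNrm, h, ih]
    · simp only [pvScan, pvNrm, h, Bool.false_eq_true, if_false, ih]
      rcases out with _ | ⟨o, os⟩ <;> simp [Bool.and_comm]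

-- pending is irrelevant while nothing was emitted
lemma pvNrm_false_pending (sep : Char → Bool) (t : List Char) :
    ∀ b b', pvNrm sep t false b = pvNrm sep t false b' := by
  induction t with
  | nil => intro b b'; rfl
  | cons c rest ih =>
    intro b b'
    by_cases h : sep c = true <;> simp [pvNrm, h]

lemma pvNrm_sep_nil (sep : Char → Bool) (ws : List Char)
    (h : ∀ c ∈ ws, sep c = true) : ∀ st p, pvNrm sep ws st p = [] := by
  induction ws with
  | nil => intro st p; rfl
  | cons c rest ih =>
    intro st p
    simp [pvNrm, h c (by simp), ih (fun x hx => h x (by simp [hx]))]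

lemma pvNrm_append_sep (sep : Char → Bool) (t ws : List Char)
    (h : ∀ c ∈ ws, sep c = true) : ∀ st p, pvNrm sep (t ++ ws) st p = pvNrm sep t st p := by
  induction t with
  | nil => intro st p; simp [pvNrm_sep_nil sep ws h, pvNrm]
  | cons c rest ih =>
    intro st p
    by_cases hc : sep c = true <;> simp [pvNrm, hc, ih]

lemma pvNrm_sep_prefix (sep : Char → Bool) (ws : List Char)
    (h : ∀ c ∈ ws, sep c = true) : ∀ t b, pvNrm sep (ws ++ t) false b = pvNrm sep t false b := by
  induction ws with
  | nil => intro t b; rfl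
  | cons c rest ih =>
    intro t b
    simp only [List.cons_append, pvNrm, h c (by simp), if_true]
    rw [ih (fun x hx => h x (by simp [hx])) t true, pvNrm_false_pending sep t true b]

-- pointwise facts about pvF / pvIsSepB
lemma pvPuncts_not_space : ∀ x ∈ pvPuncts, PySem.Chars.isspace x = false := by
  intro x hx; fin_cases hx <;> decide

lemma pvSpace_isspace : PySem.Chars.isspace ' ' = true := by decide

lemma pvSep_pt (c : Char) : PySem.Chars.isspace (pvF c) = pvIsSepB c := by
  unfold pvF pvIsSepB
  by_cases hc : c ∈ pvPuncts
  · simp [hc, pvSpace_isspace]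
  · simp [hc]

lemma pvF_fix (c : Char) (h : pvIsSepB c = false) : pvF c = c := by
  simp only [pvIsSepB, Bool.or_eq_false_iff] at h
  have : ¬ c ∈ pvPuncts := by simpa using h.2
  simp [pvF, this]

lemma pvF_fix_space (c : Char) (h : PySem.Chars.isspace c = true) : pvF c = c := by
  have hc : ¬ c ∈ pvPuncts := by
    intro hmem
    rw [pvPuncts_not_space c hmem] at h
    exact Bool.false_ne_true h
  simp [pvF, hc]

-- replacing separators by pvF turns the isspace test into pvIsSepB
lemma pvNrm_map (t : List Char) : ∀ st p,
    pvNrm PySem.Chars.isspace (t.map pvF) st p = pvNrm pvIsSepB t st p := by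
  induction t with
  | nil => intro st p; rfl
  | cons c rest ih =>
    intro st p
    simp only [List.map_cons, pvNrm, pvSep_pt]
    by_cases h : pvIsSepB c = true
    · simp [h, ih]
    · simp [h, ih, pvF_fix c (by simpa using h)]

-- join over a snoc
lemma pvJoin_snoc (sep : List Char) (xs : List (List Char)) (y : List Char) :
    PySem.Chars.join sep (xs ++ [y]) =
      if xs.isEmpty then y else PySem.Chars.join sep xs ++ sep ++ y := by
  induction xs with
  | nil => simp [PySem.Chars.join_singleton]
  | cons x xs ih =>
    rcases xs with _ | ⟨x', xs'⟩
    · simp [PySem.Chars.join_cons_cons, PySem.Chars.join_singleton]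
    · simp only [List.cons_append, PySem.Chars.join_cons_cons]
      rw [← List.cons_append, ih]
      simp [List.append_assoc]

-- join after pushing a finished word onto split₀'s reversed accumulator
lemma pvJoin_revsnoc (acc : List (List Char)) (w : List Char) :
    PySem.Chars.join [' '] ((w :: acc).reverse) =
      if acc.isEmpty then w else PySem.Chars.join [' '] acc.reverse ++ [' '] ++ w := by
  rw [List.reverse_cons, pvJoin_snoc]
  rcases acc with _ | ⟨a, as⟩ <;> simp

-- split₀.go's two defining equations, restated as rewrite rules
lemma pvGo_nil (cur : List Char) (acc : List (List Char)) :
    PySem.Chars.split₀.go [] cur acc =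
      if cur.isEmpty then acc.reverse else (cur.reverse :: acc).reverse := by
  simp [PySem.Chars.split₀.go]

lemma pvGo_cons (c : Char) (t cur : List Char) (acc : List (List Char)) :
    PySem.Chars.split₀.go (c :: t) cur acc =
      if PySem.Chars.isspace c then
        (if cur.isEmpty then PySem.Chars.split₀.go t [] acc
         else PySem.Chars.split₀.go t [] (cur.reverse :: acc))
      else PySem.Chars.split₀.go t (c :: cur) acc := by
  simp [PySem.Chars.split₀.go]

-- invariant of split₀'s accumulator loop, read through `join " "`
lemma pvSplitGo_inv (t : List Char) : ∀ (cur : List Char) (acc : List (List Char)),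
    PySem.Chars.join [' '] (PySem.Chars.split₀.go t cur acc) =
      if cur.isEmpty then
        (if acc.isEmpty then pvNrm PySem.Chars.isspace t false false
         else PySem.Chars.join [' '] acc.reverse ++ pvNrm PySem.Chars.isspace t true true)
      else
        (if acc.isEmpty then cur.reverse ++ pvNrm PySem.Chars.isspace t true false
         else PySem.Chars.join [' '] acc.reverse ++ [' '] ++ cur.reverse
                ++ pvNrm PySem.Chars.isspace t true false) := by
  induction t with
  | nil =>
    intro cur acc
    rw [pvGo_nil]
    rcases cur with _ | ⟨x, xs⟩
    · rcases acc with _ | ⟨a, as⟩ <;> simp [pvNrm, PySem.Chars.join_nil]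
    · simp only [List.isEmpty_cons, Bool.false_eq_true, if_false, pvJoin_revsnoc]
      rcases acc with _ | ⟨a, as⟩ <;> simp [pvNrm]
  | cons c t ih =>
    intro cur acc
    rw [pvGo_cons]
    by_cases hc : PySem.Chars.isspace c = true
    · rcases cur with _ | ⟨x, xs⟩
      · simp [hc, ih, pvNrm,
          pvNrm_false_pending PySem.Chars.isspace t false true]
      · simp only [hc, if_true, List.isEmpty_cons, Bool.false_eq_true, if_false, ih,
          List.isEmpty_nil, pvNrm, pvJoin_revsnoc]
        rcases acc with _ | ⟨a, as⟩ <;> simp [List.append_assoc]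
    · rcases cur with _ | ⟨x, xs⟩ <;>
        · simp only [hc, Bool.false_eq_true, if_false, if_true, List.isEmpty_cons,
            List.isEmpty_nil, ih, pvNrm]
          rcases acc with _ | ⟨a, as⟩ <;> simp [List.append_assoc]

lemma pvSplit_join (t : List Char) :
    PySem.Chars.join [' '] (PySem.Chars.split₀ t) = pvNrm PySem.Chars.isspace t false false := by
  simpa [PySem.Chars.split₀] using pvSplitGo_inv t [] []

-- single-character replace is a map
lemma pvReplaceGo_single (p r : Char) : ∀ (n : Nat) (t acc : List Char), t.length ≤ n →
    PySem.Chars.replace.go [p] [r] n t acc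
      = acc.reverse ++ t.map (fun c => if c = p then r else c) := by
  intro n
  induction n with
  | zero =>
    intro t acc h
    rcases t with _ | ⟨c, cs⟩
    · simp [PySem.Chars.replace.go]
    · simp at h
  | succ n ih =>
    intro t acc h
    rcases t with _ | ⟨c, cs⟩
    · simp [PySem.Chars.replace.go]
    · by_cases hp : p = c
      · subst hp
        simp [PySem.Chars.replace.go, List.isPrefixOf, ih cs (r :: acc) (by simpa using h)]
      · have : ([p].isPrefixOf (c :: cs)) = false := by
          simp [List.isPrefixOf]; exact fun h' => hp (by simpa using h')
        simp only [PySem.Chars.replace.go, this, Bool.false_eq_true, if_false]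
        rw [ih cs (c :: acc) (by simpa using h)]
        simp [Ne.symm hp]

lemma pvReplace_single (p r : Char) (t : List Char) :
    PySem.Chars.replace t [p] [r] = t.map (fun c => if c = p then r else c) := by
  simpa [PySem.Chars.replace] using pvReplaceGo_single p r t.length t [] (le_refl _)

-- the whole replace loop is one map
lemma pvFoldl_replace (ps : List Char) : ∀ (t : List Char),
    ps.foldl (fun s c => PySem.Chars.replace s [c] [' ']) t
      = t.map (fun x => ps.foldl (fun x c => if x = c then ' ' else x) x) := by
  induction ps with
  | nil => intro t; simp
  | cons p ps ih =>
    intro t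
    simp only [List.foldl_cons]
    rw [ih, pvReplace_single, List.map_map]
    rfl

lemma pvFoldl_if_mem (ps : List Char) (hs : ' ' ∉ ps) : ∀ (x : Char),
    ps.foldl (fun x c => if x = c then ' ' else x) x = if x ∈ ps then ' ' else x := by
  induction ps with
  | nil => intro x; simp
  | cons p ps ih =>
    intro x
    have hs' : ' ' ∉ ps := fun h => hs (List.mem_cons_of_mem _ h)
    by_cases hx : x = p
    · subst hx
      rw [List.foldl_cons, if_pos rfl, ih hs']
      simp [hs']
    · rw [List.foldl_cons, if_neg hx, ih hs']
      simp [hx]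

-- the Str-level replace loop, seen through toList
lemma pvFoldl_replace_toList (ps : List Char) : ∀ (s : String),
    (ps.foldl (fun s c => PySem.Str.replace s (String.ofList [c]) " ") s).toList
      = ps.foldl (fun l c => PySem.Chars.replace l [c] [' ']) s.toList := by
  induction ps with
  | nil => intro s; rfl
  | cons p ps ih =>
    intro s
    simp only [List.foldl_cons, ih]
    congr 1
    show (PySem.Str.replace s (String.ofList [p]) " ").toList = PySem.Chars.replace s.toList [p] [' ']
    simp [PySem.Str.replace]

-- drop the strip: leading/trailing whitespace does not affect the normal form
lemma pvNrm_strip (u : List Char) :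
    pvNrm PySem.Chars.isspace ((PySem.Chars.strip u).map pvF) false false
      = pvNrm PySem.Chars.isspace (u.map pvF) false false := by
  have hw : ∀ (w : List Char), w = (List.dropWhile PySem.Chars.isspace w.reverse).reverse
      ++ (List.takeWhile PySem.Chars.isspace w.reverse).reverse := by
    intro w
    rw [← List.reverse_append, List.takeWhile_append_dropWhile, List.reverse_reverse]
  have hdecomp : u = u.takeWhile PySem.Chars.isspace ++ (PySem.Chars.strip u
      ++ ((PySem.Chars.lstrip u).reverse.takeWhile PySem.Chars.isspace).reverse) := by
    conv_lhs => rw [← List.takeWhile_append_dropWhile (p := PySem.Chars.isspace) (l := u)]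
    congr 1
    rw [PySem.Chars.strip, PySem.Chars.rstrip]
    exact hw (PySem.Chars.lstrip u)
  conv_rhs => rw [hdecomp]
  rw [List.map_append, List.map_append]
  rw [pvNrm_sep_prefix PySem.Chars.isspace _ ?_ _ false]
  · rw [pvNrm_append_sep PySem.Chars.isspace _ _ ?_ false false]
    intro c hcm
    rcases List.mem_map.mp hcm with ⟨c₀, hc₀, rfl⟩
    have hsp : PySem.Chars.isspace c₀ = true := by
      have := List.mem_takeWhile_imp (List.mem_reverse.mp hc₀)
      simpa using this
    rw [pvF_fix_space c₀ hsp]; exact hsp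
  · intro c hcm
    rcases List.mem_map.mp hcm with ⟨c₀, hc₀, rfl⟩
    have hsp : PySem.Chars.isspace c₀ = true := List.mem_takeWhile_imp hc₀
    rw [pvF_fix_space c₀ hsp]; exact hsp

theorem pvMain (value : String) : normalize_text value = normalize_text_alt value := by
  unfold normalize_text normalize_text_alt
  rw [pvScan_inv]
  have hsp : (" " : String).toList = [' '] := by decide
  have hlow : (PySem.Str.strip (PySem.Str.lower value)).toList
      = PySem.Chars.strip (PySem.Chars.lower value.toList) := by
    simp [PySem.Str.strip, PySem.Str.lower]
  have h2 : (pvPuncts.foldl (fun s c => PySem.Str.replace s (String.ofList [c]) " ")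
        (PySem.Str.strip (PySem.Str.lower value))).toList
      = (PySem.Chars.strip (PySem.Chars.lower value.toList)).map pvF := by
    rw [pvFoldl_replace_toList, hlow, pvFoldl_replace]
    exact List.map_congr_left fun x _ => by
      rw [pvFoldl_if_mem pvPuncts (by decide) x]; rfl
  show PySem.Str.join " " (PySem.Str.split₀ _) = _
  simp only [PySem.Str.join, PySem.Str.split₀, List.map_map]
  have hid : ∀ (ws : List (List Char)),
      List.map (String.toList ∘ String.ofList) ws = ws := by
    intro ws; simp [Function.comp_def]
  rw [hid, hsp, h2, pvSplit_join, pvNrm_strip, pvNrm_map]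
  rfl
-- ===== VERDICT (by name: the statement is the Claim_ definition above) =====
theorem normalize_text_spec : Claim_equal_normalize_text := by
  intro value _
  exact pvMain value
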